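-- pv_equiv track=rewrite | github.com/madrascode/basic-python-code | Native-Datatypes/reverse_string.py | string_splitter
-- ===== SOURCE A (Python) =====
-- def string_splitter(string):
--     tmp = ''
--     splitted_list = []
--     for c in string:
--         if c != ' ':
--             tmp += c
--         else:
--             splitted_list += tmp[::-1]
--             tmp = ''
--     if tmp:
--         splitted_list += tmp[::-1]
--
--     return ''.join(splitted_list)
-- ===== SOURCE B (Python) =====
-- def string_splitter(string):
--     return ''.join(word[::-1] for word in string.split(' '))
-- ===== Notes on version B (the rewrite author's own statement) =====
-- stated objective: simpler
-- what changed: Replaces the character-by-character accumulator-and-branch scan with a single-space split followed by joining each word reversed.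
import Mathlib
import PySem

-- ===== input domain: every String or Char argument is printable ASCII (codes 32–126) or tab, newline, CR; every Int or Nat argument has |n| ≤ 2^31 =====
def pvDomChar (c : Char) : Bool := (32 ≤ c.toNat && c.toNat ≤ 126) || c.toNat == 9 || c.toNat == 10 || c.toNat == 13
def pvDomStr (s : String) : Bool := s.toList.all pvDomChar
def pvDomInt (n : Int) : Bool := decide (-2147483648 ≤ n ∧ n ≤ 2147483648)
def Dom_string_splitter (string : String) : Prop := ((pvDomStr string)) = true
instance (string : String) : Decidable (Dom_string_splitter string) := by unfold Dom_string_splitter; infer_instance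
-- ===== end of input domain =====

-- B splits on the single space and joins each word reversed; simpler than A's char-by-char accumulator scan.

-- ===== PORT A =====
-- for c in string: if c != ' ': tmp += c else: splitted_list += tmp[::-1]; tmp = ''
-- tmp[::-1] is List.reverse (PySem.Chars.slice?_none_none_neg_one); splitted_list is a list of 1-char strings,
-- ''.join(splitted_list) = PySem.Chars.join [] over the singletons.
def string_splitter (string : String) : String :=
  let st := string.toList.foldl
    (fun (s : List Char × List Char) c =>
      if c ≠ ' ' then (s.1 ++ [c], s.2)
      else (([] : List Char), s.2 ++ s.1.reverse))
    ([], [])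
  let st2 := if st.1 ≠ [] then (([] : List Char), st.2 ++ st.1.reverse) else st
  String.ofList (PySem.Chars.join [] (st2.2.map (fun c => [c])))

-- ===== PORT B =====
-- ''.join(word[::-1] for word in string.split(' '))
def string_splitter_alt (string : String) : String :=
  String.ofList (PySem.Chars.join []
    ((PySem.Chars.splitOn string.toList [' ']).map List.reverse))

-- ===== PRECONDITION & SPEC =====
def Spec_string_splitter (string : String) (out : String) : Prop := out = string_splitter_alt string
instance (string : String) (out : String) : Decidable (Spec_string_splitter string out) := by unfold Spec_string_splitter; infer_instance

-- ===== CLAIM (what is proved, stated in full; the proofs are below) =====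
def Claim_equal_string_splitter : Prop := ∀ (string : String), Dom_string_splitter string → Spec_string_splitter string (string_splitter string)

-- ===== LEMMAS AND PROOFS =====

-- reference splitter on single space, with reversed current-word accumulator `cur`
def pvWords (cur : List Char) : List Char → List (List Char)
  | [] => [cur.reverse]
  | c :: r => if c = ' ' then cur.reverse :: pvWords [] r else pvWords (c :: cur) r

theorem pvJoinNil (ws : List (List Char)) : PySem.Chars.join [] ws = ws.flatten := by
  induction ws with
  | nil => simp [PySem.Chars.join, List.intercalate]
  | cons w ws ih =>
    cases ws with
    | nil => simp [PySem.Chars.join, List.intercalate]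
    | cons w' ws' =>
      simp [PySem.Chars.join, List.intercalate] at ih ⊢
      simpa using ih

theorem pvSplitOnGo (fuel : Nat) : ∀ (l cur : List Char) (acc : List (List Char)),
    l.length ≤ fuel →
    PySem.Chars.splitOn.go [' '] fuel l cur acc = acc.reverse ++ pvWords cur l := by
  induction fuel with
  | zero =>
    intro l cur acc h
    have : l = [] := by cases l <;> simp at h ⊢
    subst this
    simp [PySem.Chars.splitOn.go, pvWords]
  | succ n ih =>
    intro l cur acc h
    cases l with
    | nil => simp [PySem.Chars.splitOn.go, pvWords]
    | cons c r =>
      by_cases hc : c = ' '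
      · subst hc
        have hpre : [' '].isPrefixOf (' ' :: r) = true := by simp [List.isPrefixOf]
        have hr := ih r [] (cur.reverse :: acc) (by simpa using Nat.le_of_succ_le_succ h)
        simp [PySem.Chars.splitOn.go, hpre, hr, pvWords]
      · simp only [PySem.Chars.splitOn.go, pvWords]
        have hpre : [' '].isPrefixOf (c :: r) = false := by
          simp [List.isPrefixOf]
          exact fun h' => hc h'.symm
        rw [hpre]
        simp only [Bool.false_eq_true, if_false, if_neg hc]
        exact ih r (c :: cur) acc (by simpa using Nat.le_of_succ_le_succ h)

theorem pvSplitOnEq (l : List Char) :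
    PySem.Chars.splitOn l [' '] = pvWords [] l := by
  unfold PySem.Chars.splitOn
  simpa using pvSplitOnGo (l.length + 1) l [] [] (by omega)

theorem pvFlattenSingletons (xs : List Char) : (xs.map (fun c => [c])).flatten = xs := by
  induction xs with
  | nil => rfl
  | cons a t ih => simp [ih]

-- A's fold, finished, equals the flattened reversed words
theorem pvFoldSpec (cs : List Char) : ∀ (tmp out : List Char),
    (let st := cs.foldl
        (fun (s : List Char × List Char) c =>
          if c ≠ ' ' then (s.1 ++ [c], s.2)
          else (([] : List Char), s.2 ++ s.1.reverse)) (tmp, out)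
     let st2 := if st.1 ≠ [] then (([] : List Char), st.2 ++ st.1.reverse) else st
     st2.2)
    = out ++ ((pvWords tmp.reverse cs).map List.reverse).flatten := by
  induction cs with
  | nil =>
    intro tmp out
    by_cases h : tmp = []
    · subst h; simp [pvWords]
    · simp [pvWords, h]
  | cons c r ih =>
    intro tmp out
    by_cases hc : c = ' '
    · subst hc
      have e1 : (if (' ' ≠ ' ') then (tmp ++ [' '], out) else (([] : List Char), out ++ tmp.reverse))
          = (([] : List Char), out ++ tmp.reverse) := by simp
      have h2 := ih [] (out ++ tmp.reverse)
      simp only [List.reverse_nil] at h2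
      rw [List.foldl_cons, e1, h2]
      simp [pvWords]
    · have e2 : (if (c ≠ ' ') then (tmp ++ [c], out) else (([] : List Char), out ++ tmp.reverse))
          = (tmp ++ [c], out) := by simp [hc]
      rw [List.foldl_cons, e2, ih (tmp ++ [c]) out]
      simp [pvWords, hc]

-- ===== VERDICT (by name: the statement is the Claim_ definition above) =====
theorem string_splitter_spec : Claim_equal_string_splitter := by
  intro s _
  have h := pvFoldSpec s.toList [] []
  simp only [List.reverse_nil, List.nil_append] at h
  simp only [Spec_string_splitter, string_splitter, string_splitter_alt, pvSplitOnEq,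
    pvJoinNil, pvFlattenSingletons]
  exact congrArg String.ofList h
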